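-- pv_equiv track=rewrite | github.com/qinfh123/first_rat_to_the_moon | first_rat_local/core/scoring.py | determine_winners
-- ===== SOURCE A (Python) =====
-- from typing import Dict, List, Tuple, Any
--
-- def determine_winners(scoring_breakdown: Dict[str, Dict[str, Any]]) -> List[str]:
--     """
--     Determine the winner(s) based on final scores and tiebreakers.
--
--     根据最终得分和平局规则确定获胜者。
--
--     Returns:
--         List of player IDs who won (can be multiple in case of ties)
--     """
--     # Find highest score
--     max_score = max(breakdown["total_score"] for breakdown in scoring_breakdown.values())
--
--     # Find all players with max score
--     tied_players = [
--         player_id for player_id, breakdown in scoring_breakdown.items()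
--         if breakdown["total_score"] == max_score
--     ]
--
--     # If only one player has max score, they win
--     if len(tied_players) == 1:
--         return tied_players
--
--     # Tiebreaker: most rats on rocket
--     max_rats_on_rocket = max(
--         scoring_breakdown[player_id]["rats_on_rocket_count"]
--         for player_id in tied_players
--     )
--
--     winners = [
--         player_id for player_id in tied_players
--         if scoring_breakdown[player_id]["rats_on_rocket_count"] == max_rats_on_rocket
--     ]
--
--     return winners
-- ===== SOURCE B (Python) =====
-- def determine_winners(scoring_breakdown):
--     best = max((b["total_score"], b["rats_on_rocket_count"])
--                for b in scoring_breakdown.values())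
--     return [player_id for player_id, b in scoring_breakdown.items()
--             if (b["total_score"], b["rats_on_rocket_count"]) == best]
-- ===== Notes on version B (the rewrite author's own statement) =====
-- stated objective: simpler
-- what changed: Replaces A's staged max-score/filter/len==1-branch/second-max/second-filter pipeline with a single lexicographic (total_score, rats_on_rocket_count) key maximum followed by one filter over the items.
-- outside the precondition, e.g. on determine_winners({'p1': {'total_score': 1}}): A returns ['p1'], B raises KeyError
import Mathlib
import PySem

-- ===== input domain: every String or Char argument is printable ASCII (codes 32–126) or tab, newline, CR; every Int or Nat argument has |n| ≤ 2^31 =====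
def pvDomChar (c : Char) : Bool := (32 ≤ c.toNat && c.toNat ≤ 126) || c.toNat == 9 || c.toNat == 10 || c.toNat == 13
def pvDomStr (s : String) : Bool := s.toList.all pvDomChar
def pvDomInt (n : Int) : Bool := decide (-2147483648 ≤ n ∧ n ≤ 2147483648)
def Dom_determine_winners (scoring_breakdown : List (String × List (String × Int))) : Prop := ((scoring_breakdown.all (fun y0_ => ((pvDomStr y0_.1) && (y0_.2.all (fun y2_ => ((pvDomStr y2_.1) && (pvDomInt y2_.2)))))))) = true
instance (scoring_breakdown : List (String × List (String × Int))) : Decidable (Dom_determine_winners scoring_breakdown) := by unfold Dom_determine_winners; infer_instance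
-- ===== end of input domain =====

-- B replaces A's staged max-score / filter / unique-branch / second-max / second-filter pipeline with one
-- lexicographic (total_score, rats_on_rocket_count) key maximum and one filter (objective: simpler).

-- shared dict-access helper: d[k] as first-match association-list lookup; exact under Pre_ (keys distinct,
-- key present — where Python would raise KeyError, Pre_ excludes the input and the default 0 is never hit)
def dget (d : List (String × Int)) (k : String) : Int :=
  ((d.find? (fun p => p.1 == k)).map (·.2)).getD 0

-- scoring_breakdown[player_id]: same convention at the outer dict
def dgetL (d : List (String × List (String × Int))) (k : String) : List (String × Int) :=
  ((d.find? (fun p => p.1 == k)).map (·.2)).getD []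

-- ===== PORT A =====
def determine_winners (scoring_breakdown : List (String × List (String × Int))) : List String :=
  -- max(...): ValueError on empty dict → excluded by Pre_, the getD 0 default is never hit there
  let max_score := (PySem.List.max? (scoring_breakdown.map (fun p => dget p.2 "total_score")) (fun x => x)).getD 0
  let tied_players := (scoring_breakdown.filter (fun p => dget p.2 "total_score" == max_score)).map (·.1)
  if tied_players.length == 1 then tied_players
  else
    let max_rats_on_rocket := (PySem.List.max? (tied_players.map (fun pid => dget (dgetL scoring_breakdown pid) "rats_on_rocket_count")) (fun x => x)).getD 0
    tied_players.filter (fun pid => dget (dgetL scoring_breakdown pid) "rats_on_rocket_count" == max_rats_on_rocket)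

-- ===== PORT B =====
-- the (total_score, rats_on_rocket_count) key of one player's breakdown
def bkey (b : List (String × Int)) : Int × Int :=
  (dget b "total_score", dget b "rats_on_rocket_count")

-- Python's max on 2-tuples: keep the current value unless the new one is lexicographically greater
-- (exact: Mathlib's ≤ on pairs is pointwise, so the comparison is written out by hand)
def lexMax (a b : Int × Int) : Int × Int :=
  if a.1 < b.1 ∨ (a.1 = b.1 ∧ a.2 < b.2) then b else a

def determine_winners_alt (scoring_breakdown : List (String × List (String × Int))) : List String :=
  match scoring_breakdown.map (fun p => bkey p.2) with
  | [] => []   -- Python: max raises ValueError here; excluded by Pre_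
  | k :: ks =>
    let best := ks.foldl lexMax k
    (scoring_breakdown.filter (fun p => bkey p.2 == best)).map (·.1)

-- ===== PRECONDITION & SPEC =====
-- Pre_ excludes: the empty dict (A raises ValueError); association lists with duplicate keys, which do not
-- correspond to any Python dict argument; and breakdowns missing "total_score" or "rats_on_rocket_count"
-- (A raises KeyError there, except that A returns without reading "rats_on_rocket_count" when the top score
-- is unique — B reads it always and would raise, so those inputs are excluded too).
def Pre_determine_winners (scoring_breakdown : List (String × List (String × Int))) : Prop :=
  scoring_breakdown ≠ [] ∧ (scoring_breakdown.map (·.1)).Nodup ∧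
  ∀ p ∈ scoring_breakdown, (p.2.map (·.1)).Nodup ∧
    "total_score" ∈ p.2.map (·.1) ∧ "rats_on_rocket_count" ∈ p.2.map (·.1)
instance (scoring_breakdown : List (String × List (String × Int))) : Decidable (Pre_determine_winners scoring_breakdown) := by unfold Pre_determine_winners; infer_instance

def pvWitness_determine_winners : (List (String × List (String × Int))) :=
  [("p1", [("total_score", 3), ("rats_on_rocket_count", 1)]),
   ("p2", [("total_score", 3), ("rats_on_rocket_count", 2)])]

def Spec_determine_winners (scoring_breakdown : List (String × List (String × Int))) (out : List String) : Prop := out = determine_winners_alt scoring_breakdown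
instance (scoring_breakdown : List (String × List (String × Int))) (out : List String) : Decidable (Spec_determine_winners scoring_breakdown out) := by unfold Spec_determine_winners; infer_instance

-- ===== CLAIM (what is proved, stated in full; the proofs are below) =====
def Claim_equal_determine_winners : Prop := ∀ (scoring_breakdown : List (String × List (String × Int))), Dom_determine_winners scoring_breakdown → Pre_determine_winners scoring_breakdown → Spec_determine_winners scoring_breakdown (determine_winners scoring_breakdown)

-- ===== LEMMAS AND PROOFS =====

-- the lexicographic order lexMax maximises, as a Prop
def lexLe (a b : Int × Int) : Prop := a.1 < b.1 ∨ (a.1 = b.1 ∧ a.2 ≤ b.2)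

theorem lexLe_lexMax_left (a b : Int × Int) : lexLe a (lexMax a b) := by
  unfold lexLe lexMax; split_ifs with h <;> omega

theorem lexLe_lexMax_right (a b : Int × Int) : lexLe b (lexMax a b) := by
  unfold lexLe lexMax; split_ifs with h <;> omega

theorem lexLe_trans {a b c : Int × Int} (h1 : lexLe a b) (h2 : lexLe b c) : lexLe a c := by
  unfold lexLe at *; omega

theorem foldl_lexMax_mem (l : List (Int × Int)) (a : Int × Int) :
    l.foldl lexMax a = a ∨ l.foldl lexMax a ∈ l := by
  induction l generalizing a with
  | nil => exact Or.inl rfl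
  | cons x t ih =>
    have hax : lexMax a x = a ∨ lexMax a x = x := by unfold lexMax; split_ifs <;> simp
    simp only [List.foldl_cons]
    rcases ih (lexMax a x) with h | h
    · rw [h]
      rcases hax with h2 | h2
      · exact Or.inl h2
      · exact Or.inr (by simp [h2])
    · exact Or.inr (List.mem_cons_of_mem _ h)

theorem lexLe_foldl_lexMax_init (l : List (Int × Int)) (a : Int × Int) :
    lexLe a (l.foldl lexMax a) := by
  induction l generalizing a with
  | nil => simp only [List.foldl_nil]; unfold lexLe; omega
  | cons x t ih => exact lexLe_trans (lexLe_lexMax_left a x) (ih (lexMax a x))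

theorem lexLe_foldl_lexMax_mem (l : List (Int × Int)) (a : Int × Int) :
    ∀ k ∈ l, lexLe k (l.foldl lexMax a) := by
  induction l generalizing a with
  | nil => intro k hk; cases hk
  | cons x t ih =>
    intro k hk
    rcases List.mem_cons.1 hk with rfl | hk
    · exact lexLe_trans (lexLe_lexMax_right a k) (lexLe_foldl_lexMax_init t (lexMax a k))
    · exact ih (lexMax a x) k hk

-- under distinct outer keys, scoring_breakdown[p.1] is p.2 for every entry p
theorem dgetL_of_mem {sb : List (String × List (String × Int))}
    (hnd : (sb.map (·.1)).Nodup) {p : String × List (String × Int)} (hp : p ∈ sb) :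
    dgetL sb p.1 = p.2 := by
  induction sb with
  | nil => cases hp
  | cons q t ih =>
    simp only [List.map_cons, List.nodup_cons] at hnd
    rcases List.mem_cons.1 hp with rfl | hp
    · simp [dgetL]
    · have hne : ¬(q.1 == p.1) = true := by
        intro h
        exact hnd.1 (by simpa [eq_of_beq h] using List.mem_map_of_mem (f := (·.1)) hp)
      simpa [dgetL, List.find?, hne] using ih hnd.2 hp

theorem determine_winners_spec_aux :
    ∀ (sb : List (String × List (String × Int))), Pre_determine_winners sb →
      determine_winners sb = determine_winners_alt sb := by
  intro sb hpre
  obtain ⟨hne, hnd, -⟩ := hpre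
  obtain ⟨q, t, rfl⟩ := List.exists_cons_of_ne_nil hne
  set best : Int × Int := (t.map (fun p => bkey p.2)).foldl lexMax (bkey q.2) with hbest
  have hBalt : determine_winners_alt (q :: t) =
      ((q :: t).filter (fun p => bkey p.2 == best)).map (·.1) := rfl
  -- best is the key of some entry q0, and dominates every key lexicographically
  have hmemb : best ∈ (q :: t).map (fun p => bkey p.2) := by
    rcases foldl_lexMax_mem (t.map (fun p => bkey p.2)) (bkey q.2) with h | h
    · rw [hbest, h]; simp
    · rw [hbest]; exact List.mem_cons_of_mem _ h
  obtain ⟨q0, hq0mem, hq0⟩ := List.mem_map.1 hmemb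
  have hle : ∀ p ∈ (q :: t), lexLe (bkey p.2) best := by
    intro p hp
    rcases List.mem_cons.1 hp with rfl | hp
    · exact lexLe_foldl_lexMax_init _ _
    · exact lexLe_foldl_lexMax_mem _ _ _ (List.mem_map_of_mem (f := fun p => bkey p.2) hp)
  -- A's max score m
  obtain ⟨m, hm⟩ : ∃ m, PySem.List.max? ((q :: t).map (fun p => dget p.2 "total_score")) (fun x => x) = some m := by
    cases hmax : PySem.List.max? ((q :: t).map (fun p => dget p.2 "total_score")) (fun x => x) with
    | none =>
      have := (PySem.List.max?_eq_none_iff _ _).1 hmax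
      simp at this
    | some m => exact ⟨m, rfl⟩
  obtain ⟨pM, hpMmem, hpM⟩ := List.mem_map.1 (PySem.List.max?_mem hm)
  have hmmax : ∀ p ∈ (q :: t), dget p.2 "total_score" ≤ m := fun p hp =>
    PySem.List.max?_isMax hm (dget p.2 "total_score")
      (List.mem_map_of_mem (f := fun p => dget p.2 "total_score") hp)
  have hb1 : best.1 = m := by
    have h1 : best.1 ≤ m := by
      have h := congrArg Prod.fst hq0
      rw [← h]; exact hmmax q0 hq0mem
    have h2 : lexLe (bkey pM.2) best := hle pM hpMmem
    have h3 : (bkey pM.2).1 = m := hpM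
    unfold lexLe at h2; omega
  -- reduce A's body: resolve the first max
  rw [hBalt]
  unfold determine_winners
  simp only [hm, Option.getD_some]
  set T : List (String × List (String × Int)) :=
    (q :: t).filter (fun p => dget p.2 "total_score" == m) with hT
  have hq0T : q0 ∈ T := by
    refine List.mem_filter.2 ⟨hq0mem, ?_⟩
    have h : dget q0.2 "total_score" = m := by
      have h := congrArg Prod.fst hq0
      simpa [bkey, hb1] using h
    simp [h]
  have hTsub : ∀ p ∈ T, p ∈ (q :: t) := fun p hp => (List.mem_filter.1 hp).1
  have hTf : ∀ p ∈ T, dget p.2 "total_score" = m := fun p hp => by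
    have := (List.mem_filter.1 hp).2; simpa using this
  have hq0g : dget q0.2 "rats_on_rocket_count" = best.2 := congrArg Prod.snd hq0
  -- B's filter coincides with a rats-filter over T
  have hfilter : (q :: t).filter (fun p => bkey p.2 == best) =
      T.filter (fun p => dget p.2 "rats_on_rocket_count" == best.2) := by
    rw [hT, List.filter_filter]
    apply List.filter_congr
    intro p hp
    rcases eq_or_ne (dget p.2 "total_score") m with hfp | hfp
    · have hb : best = (dget p.2 "total_score", best.2) := by
        apply Prod.ext <;> simp [hb1, hfp]
      rw [hb]
      show ((dget p.2 "total_score" == dget p.2 "total_score") && (dget p.2 "rats_on_rocket_count" == best.2))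
        = ((dget p.2 "rats_on_rocket_count" == best.2) && (dget p.2 "total_score" == m))
      simp [hfp, Bool.and_comm]
    · have h1 : ¬(bkey p.2 == best) = true := by
        intro h
        have h2 : (bkey p.2).1 = best.1 := congrArg Prod.fst (eq_of_beq h)
        have h3 : dget p.2 "total_score" = (bkey p.2).1 := rfl
        exact hfp ((h3.trans h2).trans hb1)
      simp [Bool.eq_false_iff.2 h1, hfp]
  rw [hfilter]
  -- lookups along T resolve to the entry itself
  have hlook : ∀ p ∈ T, dget (dgetL (q :: t) p.1) "rats_on_rocket_count" = dget p.2 "rats_on_rocket_count" := by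
    intro p hp; rw [dgetL_of_mem hnd (hTsub p hp)]
  have hmapg : (T.map (·.1)).map (fun pid => dget (dgetL (q :: t) pid) "rats_on_rocket_count") =
      T.map (fun p => dget p.2 "rats_on_rocket_count") := by
    rw [List.map_map]
    exact List.map_congr_left hlook
  by_cases hlen : (T.map (·.1)).length = 1
  · -- unique top scorer: T = [p]
    obtain ⟨p, hp⟩ : ∃ p, T = [p] := by
      have : T.length = 1 := by simpa using hlen
      exact List.length_eq_one_iff.1 this
    have hq0p : q0 = p := by rw [hp] at hq0T; simpa using hq0T
    rw [hp]
    simp [← hq0p, hq0g]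
  · -- tie: A's second max equals best.2, and the two filters coincide
    rw [if_neg (by simpa using hlen)]
    obtain ⟨r, hr⟩ : ∃ r, PySem.List.max? (T.map (fun p => dget p.2 "rats_on_rocket_count")) (fun x => x) = some r := by
      cases hmax : PySem.List.max? (T.map (fun p => dget p.2 "rats_on_rocket_count")) (fun x => x) with
      | none =>
        have hTnil : T = [] := by
          have := (PySem.List.max?_eq_none_iff _ _).1 hmax
          simpa using this
        rw [hTnil] at hq0T; cases hq0T
      | some r => exact ⟨r, rfl⟩
    have hrmax : ∀ p ∈ T, dget p.2 "rats_on_rocket_count" ≤ r := fun p hp =>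
      PySem.List.max?_isMax hr (dget p.2 "rats_on_rocket_count")
        (List.mem_map_of_mem (f := fun p => dget p.2 "rats_on_rocket_count") hp)
    obtain ⟨pR, hpRmem, hpR⟩ := List.mem_map.1 (PySem.List.max?_mem hr)
    have hrb2 : r = best.2 := by
      have h1 : dget q0.2 "rats_on_rocket_count" ≤ r := hrmax q0 hq0T
      have h2 : lexLe (bkey pR.2) best := hle pR (hTsub pR hpRmem)
      have h3 : (bkey pR.2).1 = best.1 := by
        have := hTf pR hpRmem
        simpa [bkey, hb1] using this
      have h4 : (bkey pR.2).2 = r := hpR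
      unfold lexLe at h2; omega
    rw [hmapg, hr, Option.getD_some, hrb2]
    rw [List.filter_map]
    congr 1
    apply List.filter_congr
    intro p hp
    simp [Function.comp, hlook p hp]

-- ===== VERDICT (by name: the statement is the Claim_ definition above) =====
theorem determine_winners_spec : Claim_equal_determine_winners := by
  intro sb _ hpre
  exact determine_winners_spec_aux sb hpre
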